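-- pv_equiv track=rewrite | github.com/sivaren/Stima-Tucil3 | Kurang_i.py | transposeToMatrix
-- ===== SOURCE A (Python) =====
-- def transposeToMatrix(array):
--     matrix = []
--     baris = []
--     for i in range(len(array)):
--         baris.append(array[i])
--         if ((i + 1) % 4 == 0):
--             matrix.append(baris)
--             baris = []
--     return matrix
-- ===== SOURCE B (Python) =====
-- def transposeToMatrix(array):
--     # Idiomatic grouper: chunk the iterator into rows of 4, dropping the trailing remainder.
--     return list(map(list, zip(*[iter(array)] * 4)))
-- ===== Notes on version B (the rewrite author's own statement) =====
-- stated objective: idiomatic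
-- what changed: Replaces the index loop with a running row buffer and modulo-4 test by the standard zip-grouper idiom that chunks the iterator directly into rows of 4 (remainder dropped).
import Mathlib
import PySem

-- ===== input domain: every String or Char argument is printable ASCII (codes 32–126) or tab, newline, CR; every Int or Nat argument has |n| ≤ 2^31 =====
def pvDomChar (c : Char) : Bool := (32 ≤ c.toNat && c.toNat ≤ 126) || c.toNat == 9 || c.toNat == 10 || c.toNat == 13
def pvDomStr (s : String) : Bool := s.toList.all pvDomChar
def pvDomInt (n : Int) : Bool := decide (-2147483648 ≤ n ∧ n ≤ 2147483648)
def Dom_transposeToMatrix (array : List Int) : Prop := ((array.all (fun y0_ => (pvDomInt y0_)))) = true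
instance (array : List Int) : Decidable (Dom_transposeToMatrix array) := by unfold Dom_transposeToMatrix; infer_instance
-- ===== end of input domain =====

-- B replaces A's running row buffer with a modulo-4 test by direct chunking into rows of 4 (idiomatic; remainder dropped identically).

-- ===== PORT A =====
-- state: (matrix, baris); body of the for-loop over range(len(array))
def transposeToMatrixStep (array : List Int) (st : List (List Int) × List Int) (i : Int) :
    List (List Int) × List Int :=
  let baris := st.2 ++ [PySem.List.pyGetD array i 0]   -- baris.append(array[i]); index always in range here
  if PySem.Int.mod (i + 1) 4 == 0 then (st.1 ++ [baris], []) else (st.1, baris)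

def transposeToMatrix (array : List Int) : List (List Int) :=
  ((PySem.List.pyRange 0 (array.length : Int) 1).foldl (transposeToMatrixStep array) ([], [])).1

-- ===== PORT B =====
-- grouper idiom: take four elements at a time; a trailing partial group is dropped
def transposeToMatrix_alt (array : List Int) : List (List Int) :=
  match array with
  | a :: b :: c :: d :: rest => [a, b, c, d] :: transposeToMatrix_alt rest
  | _ => []

-- ===== PRECONDITION & SPEC =====
def Spec_transposeToMatrix (array : List Int) (out : List (List Int)) : Prop := out = transposeToMatrix_alt array
instance (array : List Int) (out : List (List Int)) : Decidable (Spec_transposeToMatrix array out) := by unfold Spec_transposeToMatrix; infer_instance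

-- ===== CLAIM (what is proved, stated in full; the proofs are below) =====
def Claim_equal_transposeToMatrix : Prop := ∀ (array : List Int), Dom_transposeToMatrix array → Spec_transposeToMatrix array (transposeToMatrix array)

-- ===== LEMMAS AND PROOFS =====

-- the fold body applied to an enumerated pair
def stepP (st : List (List Int) × List Int) (p : Int × Int) : List (List Int) × List Int :=
  if PySem.Int.mod (p.1 + 1) 4 == 0 then (st.1 ++ [st.2 ++ [p.2]], []) else (st.1, st.2 ++ [p.2])

lemma fold_eq_enumerate (array : List Int) :
    (PySem.List.pyRange 0 (array.length : Int) 1).foldl (transposeToMatrixStep array) ([], []) =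
    (PySem.List.enumerate array 0).foldl stepP ([], []) := by
  rw [PySem.List.enumerate_eq_map_pyRange array 0, List.foldl_map]
  rfl

lemma fold_chunks (xs : List Int) :
    ∀ (acc : List (List Int)) (s : Int), (4:Int) ∣ s →
      ((PySem.List.enumerate xs s).foldl stepP (acc, [])).1 = acc ++ transposeToMatrix_alt xs := by
  induction xs using transposeToMatrix_alt.induct with
  | case1 a b c d rest ih =>
    intro acc s hs
    have h1 : ¬ (4:Int) ∣ (s + 1) := by omega
    have h2 : ¬ (4:Int) ∣ (s + 1 + 1) := by omega
    have h3 : ¬ (4:Int) ∣ (s + 1 + 1 + 1) := by omega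
    have h4 : (4:Int) ∣ (s + 1 + 1 + 1 + 1) := by omega
    simp only [PySem.List.enumerate_cons, List.foldl_cons, stepP,
      PySem.Int.mod_eq_zero_iff_dvd, beq_iff_eq,
      if_neg h1, if_neg h2, if_neg h3, if_pos h4]
    rw [ih (acc ++ [[] ++ [a] ++ [b] ++ [c] ++ [d]]) (s + 1 + 1 + 1 + 1) (by omega)]
    simp [transposeToMatrix_alt]
  | case2 xs hxs =>
    intro acc s hs
    have h1 : ¬ (4:Int) ∣ (s + 1) := by omega
    have h2 : ¬ (4:Int) ∣ (s + 1 + 1) := by omega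
    have h3 : ¬ (4:Int) ∣ (s + 1 + 1 + 1) := by omega
    match xs, hxs with
    | [], _ => simp [PySem.List.enumerate_nil, transposeToMatrix_alt]
    | [a], _ =>
      simp [PySem.List.enumerate_cons, PySem.List.enumerate_nil, stepP,
        h1, transposeToMatrix_alt]
    | [a, b], _ =>
      simp [PySem.List.enumerate_cons, PySem.List.enumerate_nil, stepP,
        h1, h2, transposeToMatrix_alt]
    | [a, b, c], _ =>
      simp [PySem.List.enumerate_cons, PySem.List.enumerate_nil, stepP,
        h1, h2, h3, transposeToMatrix_alt]
    | a :: b :: c :: d :: rest, h => exact (h a b c d rest rfl).elim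

-- ===== VERDICT (by name: the statement is the Claim_ definition above) =====
theorem transposeToMatrix_spec : Claim_equal_transposeToMatrix := by
  intro array _
  unfold Spec_transposeToMatrix transposeToMatrix
  rw [fold_eq_enumerate, fold_chunks array [] 0 (by omega), List.nil_append]
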